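-- pv_equiv track=rewrite | github.com/pokerdio/generic | e/e-98.py | getpat
-- ===== SOURCE A (Python) =====
-- def getpat(s):
--     s = str(s)
--     a = ord("a")
--     pat = ""
--     x = {}
--     for c in s:
--         if c not in x:
--             x[c] = chr(a)
--             a += 1
--
--         pat += x[c]
--     return pat
-- ===== SOURCE B (Python) =====
-- def getpat(s):
--     s = str(s)
--     return "".join(chr(ord("a") + len(set(s[:s.index(c)]))) for c in s)
-- ===== Notes on version B (the rewrite author's own statement) =====
-- stated objective: alternative
-- what changed: Removes A's stateful dict-building pass entirely: B computes each character's letter independently by a positional closed form, chr(97 + number of distinct characters before that character's first occurrence), via s.index and a set over the prefix.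
import Mathlib
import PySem

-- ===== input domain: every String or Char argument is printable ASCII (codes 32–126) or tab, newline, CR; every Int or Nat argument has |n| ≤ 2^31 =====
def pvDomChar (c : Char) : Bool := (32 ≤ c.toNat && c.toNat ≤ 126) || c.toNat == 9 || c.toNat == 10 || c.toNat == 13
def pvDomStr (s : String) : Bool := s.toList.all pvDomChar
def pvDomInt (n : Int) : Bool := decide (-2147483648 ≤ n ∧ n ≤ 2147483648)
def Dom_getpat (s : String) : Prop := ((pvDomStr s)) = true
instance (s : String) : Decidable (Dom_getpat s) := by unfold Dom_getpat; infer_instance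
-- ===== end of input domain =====

-- B drops A's stateful discover-and-label dict pass entirely: each character's letter is computed
-- directly from the string as 97 + the number of distinct characters before its first occurrence
-- (a positional closed form; alternative algorithm, not faster).


-- ===== PORT A =====
-- A's loop body: `if c not in x: x[c] = chr(a); a += 1` then `pat += x[c]`.
-- `pat` is carried as a List Char and packed at the end (Lean's own String append is
-- kernel-opaque); `x[c]` is `getD … ' '`: at that point the key is always present,
-- so the default is never used.
def getpatStep (st : Nat × List Char × PySem.Dict Char Char) (c : Char) :
    Nat × List Char × PySem.Dict Char Char :=
  let a := st.1
  let pat := st.2.1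
  let x := st.2.2
  if x.contains c then (a, pat ++ [x.getD c ' '], x)
  else
    let x' := x.insert c (Char.ofNat a)
    (a + 1, pat ++ [x'.getD c ' '], x')

def getpat (s : String) : String :=
  String.ofList ((s.toList.foldl getpatStep (97, [], PySem.Dict.empty)).2.1)

-- ===== PORT B =====
-- ''.join(chr(ord('a') + len(set(s[:s.index(c)]))) for c in s).
-- s.index(c) always succeeds (c is drawn from s) and is nonnegative, so the slice
-- s[:s.index(c)] is `take`; set(...) is PySem.Set.ofList, len is length; the join of
-- one-char strings is packed with String.ofList.
def getpat_alt (s : String) : String :=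
  String.ofList (s.toList.map (fun c =>
    Char.ofNat (97 +
      (PySem.Set.ofList (s.toList.take ((PySem.List.index? s.toList c).getD 0))).length)))

-- ===== PRECONDITION & SPEC =====
def Spec_getpat (s : String) (out : String) : Prop := out = getpat_alt s
instance (s : String) (out : String) : Decidable (Spec_getpat s out) := by unfold Spec_getpat; infer_instance

-- ===== CLAIM (what is proved, stated in full; the proofs are below) =====
def Claim_equal_getpat : Prop := ∀ (s : String), Dom_getpat s → Spec_getpat s (getpat s)

-- ===== LEMMAS AND PROOFS =====

-- the association list [(u[0], chr(97+s)), (u[1], chr(97+s+1)), …]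
def pvPairs (s : Nat) (u : List Char) : List (Char × Char) :=
  (PySem.List.enumerate u (s : Int)).map (fun p => (p.2, Char.ofNat (97 + p.1.toNat)))

-- the canonical letter for c relative to the first-occurrence list u
def pvEmit (u : List Char) (c : Char) : Char := Char.ofNat (97 + u.idxOf c)

lemma pvPairs_append (s : Nat) (u : List Char) (c : Char) :
    pvPairs s (u ++ [c]) = pvPairs s u ++ [(c, Char.ofNat (97 + s + u.length))] := by
  simp [pvPairs, PySem.List.enumerate_append, PySem.List.enumerate_cons, PySem.List.enumerate_nil]
  congr 1
  omega

lemma pvGet (s : Nat) (u : List Char) (c : Char) :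
    (PySem.Dict.mk (pvPairs s u)).get? c =
      if c ∈ u then some (Char.ofNat (97 + s + u.idxOf c)) else none := by
  induction u generalizing s with
  | nil => simp [pvPairs, PySem.List.enumerate_nil, PySem.Dict.get?]
  | cons x u ih =>
    have hcast : (s : Int) + 1 = ((s + 1 : Nat) : Int) := by push_cast; ring
    simp only [pvPairs, PySem.List.enumerate_cons, List.map_cons, PySem.Dict.get?_mk_cons, hcast]
    by_cases hx : x = c
    · subst hx
      simp
    · have hxc : (x == c) = false := by simp [hx]
      simp only [hxc, Bool.false_eq_true, if_false]
      rw [show ((PySem.List.enumerate u ((s + 1 : Nat) : Int)).map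
            (fun p => (p.2, Char.ofNat (97 + p.1.toNat)))) = pvPairs (s + 1) u from rfl, ih]
      by_cases hc : c ∈ u
      · have hidx : (x :: u).idxOf c = u.idxOf c + 1 := by
          simp [List.idxOf_cons, hxc]
        rw [if_pos hc, if_pos (List.mem_cons_of_mem x hc), hidx]
        congr 2
        omega
      · have hcx : c ∉ x :: u := by
          intro h
          rcases List.mem_cons.mp h with h1 | h1
          · exact hx h1.symm
          · exact hc h1
        rw [if_neg hc, if_neg hcx]

lemma pvContains (s : Nat) (u : List Char) (c : Char) :
    (PySem.Dict.mk (pvPairs s u)).contains c = decide (c ∈ u) := by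
  rw [PySem.Dict.contains_eq_isSome_get?, pvGet]
  by_cases hc : c ∈ u <;> simp [hc]

lemma pvGetD (s : Nat) (u : List Char) (c : Char) (hc : c ∈ u) :
    (PySem.Dict.mk (pvPairs s u)).getD c ' ' = Char.ofNat (97 + s + u.idxOf c) := by
  rw [PySem.Dict.getD_eq_get?_getD, pvGet]
  simp [hc]

-- A's loop invariant: after the whole pass, the counter, the emitted pattern and the dict
-- are all determined by the first-occurrence list of the processed characters.
lemma A_loop (l : List Char) :
    l.foldl getpatStep (97, ([] : List Char), PySem.Dict.empty) =
      (97 + (PySem.Set.ofList l).length,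
       l.map (pvEmit (PySem.Set.ofList l)),
       PySem.Dict.mk (pvPairs 0 (PySem.Set.ofList l))) := by
  induction l using List.reverseRecOn with
  | nil => rfl
  | append_singleton l c ih =>
    rw [List.foldl_append, List.foldl_cons, List.foldl_nil, ih]
    have hmem : c ∈ PySem.Set.ofList l ↔ c ∈ l := PySem.Set.mem_ofList l c
    by_cases hc : c ∈ l
    · have hcU : c ∈ PySem.Set.ofList l := hmem.mpr hc
      have hU : PySem.Set.ofList (l ++ [c]) = PySem.Set.ofList l := by
        rw [PySem.Set.ofList_append_singleton, PySem.Set.add_of_mem hcU]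
      simp only [getpatStep, pvContains, hcU, decide_true, if_true, hU]
      refine Prod.ext rfl (Prod.ext ?_ rfl)
      simp only [List.map_append, List.map_cons, List.map_nil, List.append_cancel_left_eq]
      rw [pvGetD 0 _ c hcU]
      simp [pvEmit]
    · have hcU : c ∉ PySem.Set.ofList l := fun h => hc (hmem.mp h)
      have hU : PySem.Set.ofList (l ++ [c]) = PySem.Set.ofList l ++ [c] := by
        rw [PySem.Set.ofList_append_singleton, PySem.Set.add_of_not_mem hcU]
      simp only [getpatStep, pvContains, hcU, decide_false, Bool.false_eq_true, if_false, hU]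
      have hins : (PySem.Dict.mk (pvPairs 0 (PySem.Set.ofList l))).insert c
            (Char.ofNat (97 + (PySem.Set.ofList l).length)) =
          PySem.Dict.mk (pvPairs 0 (PySem.Set.ofList l ++ [c])) := by
        apply PySem.Dict.ext
        rw [PySem.Dict.items_insert_of_not_contains]
        · rw [pvPairs_append]
        · rw [pvContains]; simp [hcU]
      rw [hins]
      refine Prod.ext (by simp; omega) (Prod.ext ?_ rfl)
      simp only [List.map_append, List.map_cons, List.map_nil]
      congr 1
      · apply List.map_congr_left
        intro c' hc'
        have hc'U : c' ∈ PySem.Set.ofList l := (PySem.Set.mem_ofList l c').mpr hc'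
        simp only [pvEmit]
        rw [List.idxOf_append_of_mem hc'U]
      · rw [pvGetD 0 _ c (by simp)]
        simp only [pvEmit]

-- Set.update only ever appends elements.
lemma update_append (s : PySem.Set Char) (xs : List Char) :
    ∃ t, PySem.Set.update s xs = s ++ t := by
  induction xs generalizing s with
  | nil => exact ⟨[], by simp [PySem.Set.update_nil]⟩
  | cons x xs ih =>
    rw [PySem.Set.update_cons]
    obtain ⟨t, ht⟩ := ih (PySem.Set.add s x)
    by_cases hx : x ∈ s
    · exact ⟨t, by rw [PySem.Set.add_of_mem hx] at ht ⊢; exact ht⟩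
    · exact ⟨x :: t, by rw [PySem.Set.add_of_not_mem hx] at ht ⊢; rw [ht]; simp⟩

lemma idxOf_append_not_mem {c : Char} {a : List Char} (h : c ∉ a) (b : List Char) :
    (a ++ b).idxOf c = a.length + b.idxOf c := by
  induction a with
  | nil => simp
  | cons x a ih =>
    have hx : (x == c) = false := by
      simp only [beq_eq_false_iff_ne]; intro hxc; exact h (hxc ▸ List.mem_cons_self)
    simp only [List.cons_append, List.idxOf_cons, hx, cond_false, List.length_cons,
      ih (fun hm => h (List.mem_cons_of_mem x hm))]
    omega

-- the key bridge: the number of distinct characters strictly before c's first occurrence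
-- is exactly c's index in the first-occurrence list.
lemma distinct_before_eq_idxOf (l : List Char) (c : Char) (hc : c ∈ l) :
    (PySem.Set.ofList (l.take ((PySem.List.index? l c).getD 0))).length =
      (PySem.Set.ofList l).idxOf c := by
  obtain ⟨k, hk⟩ := Option.isSome_iff_exists.mp ((PySem.List.index?_isSome_iff l c).mpr hc)
  obtain ⟨pre, suf, hsplit, hlen, hpre⟩ := (PySem.List.index?_eq_some_iff l c k).mp hk
  have htake : l.take ((PySem.List.index? l c).getD 0) = pre := by
    rw [hk, Option.getD_some, ← hlen, hsplit, List.take_left]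
  rw [htake]
  have hnm : c ∉ PySem.Set.ofList pre := fun h => hpre ((PySem.Set.mem_ofList pre c).mp h)
  have hL : PySem.Set.ofList l =
      PySem.Set.update (PySem.Set.ofList pre ++ [c]) suf := by
    rw [hsplit, show pre ++ c :: suf = (pre ++ [c]) ++ suf by simp,
      PySem.Set.ofList_append, PySem.Set.ofList_append_singleton,
      PySem.Set.add_of_not_mem hnm]
  obtain ⟨t, ht⟩ := update_append (PySem.Set.ofList pre ++ [c]) suf
  rw [hL, ht, List.append_assoc, idxOf_append_not_mem hnm]
  simp

-- ===== VERDICT (by name: the statement is the Claim_ definition above) =====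
theorem getpat_spec : Claim_equal_getpat := by
  intro s _
  unfold Spec_getpat getpat getpat_alt
  rw [A_loop]
  congr 1
  apply List.map_congr_left
  intro c hc
  rw [pvEmit, distinct_before_eq_idxOf s.toList c hc]
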